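-- pv_equiv track=rewrite | github.com/AmitabhainArunachala/clawd | skills/rv-toolkit/rv_toolkit/validation/gemma_full_validation_v2.py | get_trigram_repetition
-- ===== SOURCE A (Python) =====
-- from collections import Counter
--
-- def get_trigram_repetition(text):
--     """Count maximum trigram repetition"""
--     words = text.lower().split()
--     if len(words) < 3:
--         return 0
--     trigrams = [' '.join(words[i:i+3]) for i in range(len(words)-2)]
--     if not trigrams:
--         return 0
--     return max(Counter(trigrams).values())
-- ===== SOURCE B (Python) =====
-- def _longest_run(sorted_trigrams):
--     """Length of the longest run of equal consecutive items (0 for an empty list)."""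
--     if not sorted_trigrams:
--         return 0
--     best = run = 1
--     prev = sorted_trigrams[0]
--     for t in sorted_trigrams[1:]:
--         if t == prev:
--             run += 1
--         else:
--             prev = t
--             run = 1
--         if run > best:
--             best = run
--     return best
--
-- def get_trigram_repetition(text):
--     """Count maximum trigram repetition (sort-and-scan run lengths)"""
--     words = text.lower().split()
--     if len(words) < 3:
--         return 0
--     return _longest_run(sorted(' '.join(words[i:i+3]) for i in range(len(words)-2)))
-- ===== Notes on version B (the rewrite author's own statement) =====
-- stated objective: alternative
-- what changed: Replaces the Counter hash tally and max over its values by sorting the trigram list and taking the longest run of equal consecutive trigrams in one scan.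
import Mathlib
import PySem

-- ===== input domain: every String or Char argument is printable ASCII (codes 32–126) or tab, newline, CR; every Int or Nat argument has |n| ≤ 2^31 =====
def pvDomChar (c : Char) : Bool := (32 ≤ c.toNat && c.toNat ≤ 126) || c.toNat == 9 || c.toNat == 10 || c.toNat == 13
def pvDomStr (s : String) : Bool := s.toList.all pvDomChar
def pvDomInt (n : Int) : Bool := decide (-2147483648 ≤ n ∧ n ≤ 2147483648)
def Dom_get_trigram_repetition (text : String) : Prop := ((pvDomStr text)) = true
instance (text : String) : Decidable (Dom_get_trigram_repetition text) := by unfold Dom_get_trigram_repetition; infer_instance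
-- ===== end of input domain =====

-- B replaces the Counter tally and max over its values by sorting the trigram list and
-- scanning once for the longest run of equal consecutive trigrams (alternative algorithm).

-- ===== PORT A =====
def get_trigram_repetition (text : String) : Int :=
  let words := PySem.Str.split₀ (PySem.Str.lower text)
  if words.length < 3 then 0
  else
    let trigrams := (PySem.List.pyRange 0 ((words.length : Int) - 2) 1).map
      (fun i => PySem.Str.join " " (PySem.List.slice words (some i) (some (i + 3))))
    if trigrams.isEmpty then 0
    else
      match PySem.List.max? (PySem.Dict.counter trigrams).values (fun v => v) with
      | some m => m
      | none => 0  -- unreachable: trigrams is nonempty on this branch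

-- ===== PORT B =====
-- length of the longest run of equal consecutive items (0 for an empty list)
def longestRun : List String → Int
  | [] => 0
  | p :: rest =>
    (rest.foldl (fun (s : String × Int × Int) t =>
        let pr := if t == s.1 then (s.1, s.2.1 + 1) else (t, (1 : Int))
        (pr.1, pr.2, if pr.2 > s.2.2 then pr.2 else s.2.2)) (p, 1, 1)).2.2

def get_trigram_repetition_alt (text : String) : Int :=
  let words := PySem.Str.split₀ (PySem.Str.lower text)
  if words.length < 3 then 0
  else
    longestRun (PySem.List.sorted
      ((PySem.List.pyRange 0 ((words.length : Int) - 2) 1).map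
        (fun i => PySem.Str.join " " (PySem.List.slice words (some i) (some (i + 3)))))
      (fun x => x) false)

-- ===== PRECONDITION & SPEC =====
def Spec_get_trigram_repetition (text : String) (out : Int) : Prop := out = get_trigram_repetition_alt text
instance (text : String) (out : Int) : Decidable (Spec_get_trigram_repetition text out) := by unfold Spec_get_trigram_repetition; infer_instance

-- ===== CLAIM (what is proved, stated in full; the proofs are below) =====
def Claim_equal_get_trigram_repetition : Prop := ∀ (text : String), Dom_get_trigram_repetition text → Spec_get_trigram_repetition text (get_trigram_repetition text)

-- ===== LEMMAS AND PROOFS =====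

-- max of a nonempty Int list (0 on []), as Python's running-max loop computes it
def genmax : List Int → Int
  | [] => 0
  | a :: t => t.foldl max a

-- maximum multiplicity of any element of l
def maxMult (l : List String) : Int := genmax (l.map (fun x => (l.count x : Int)))

-- the run-length maximum that B's loop computes from state (prev, run)
def runM : List String → String → Int → Int
  | [], _, run => run
  | t :: r, prev, run => if t = prev then runM r prev (run + 1) else max run (runM r t 1)

theorem le_foldl_max_init (l : List Int) (a : Int) : a ≤ l.foldl max a := by
  induction l generalizing a with
  | nil => simp
  | cons b t ih => exact le_trans (le_max_left a b) (ih (max a b))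

theorem le_foldl_max_mem (l : List Int) (a x : Int) (hx : x ∈ l) : x ≤ l.foldl max a := by
  induction l generalizing a with
  | nil => simp at hx
  | cons b t ih =>
    rcases List.mem_cons.mp hx with h | h
    · subst h; exact le_trans (le_max_right a x) (le_foldl_max_init t (max a x))
    · exact ih (max a b) h

theorem foldl_max_mem (l : List Int) (a : Int) : l.foldl max a = a ∨ l.foldl max a ∈ l := by
  induction l generalizing a with
  | nil => left; rfl
  | cons b t ih =>
    rcases ih (max a b) with h | h
    · rcases max_choice a b with hm | hm
      · left; rw [List.foldl_cons, h, hm]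
      · right; rw [List.foldl_cons, h, hm]; exact List.mem_cons_self
    · right; exact List.mem_cons_of_mem b h

theorem le_genmax (xs : List Int) (x : Int) (hx : x ∈ xs) : x ≤ genmax xs := by
  cases xs with
  | nil => simp at hx
  | cons a t =>
    rcases List.mem_cons.mp hx with h | h
    · subst h; exact le_foldl_max_init t x
    · exact le_foldl_max_mem t a x h

theorem genmax_mem (xs : List Int) (h : xs ≠ []) : genmax xs ∈ xs := by
  cases xs with
  | nil => exact absurd rfl h
  | cons a t =>
    rcases foldl_max_mem t a with h | h
    · rw [genmax, h]; exact List.mem_cons_self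
    · exact List.mem_cons_of_mem a h

theorem genmax_eq (xs ys : List Int) (hx : xs ≠ []) (hy : ys ≠ [])
    (h1 : ∀ a ∈ xs, ∃ b ∈ ys, a ≤ b) (h2 : ∀ b ∈ ys, ∃ a ∈ xs, b ≤ a) :
    genmax xs = genmax ys := by
  apply le_antisymm
  · obtain ⟨b, hb, hab⟩ := h1 _ (genmax_mem xs hx)
    exact le_trans hab (le_genmax ys b hb)
  · obtain ⟨a, ha, hba⟩ := h2 _ (genmax_mem ys hy)
    exact le_trans hba (le_genmax xs a ha)

theorem maxMult_perm (l₁ l₂ : List String) (hp : l₁.Perm l₂) : maxMult l₁ = maxMult l₂ := by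
  rcases eq_or_ne l₁ [] with h | h
  · subst h; rw [hp.symm.eq_nil]
  · have h₂ : l₂ ≠ [] := by intro h2; subst h2; exact h hp.eq_nil
    unfold maxMult
    apply genmax_eq
    · simpa using h
    · simpa using h₂
    · intro a ha
      obtain ⟨x, hx, rfl⟩ := List.mem_map.mp ha
      exact ⟨(l₂.count x : Int), List.mem_map_of_mem (hp.mem_iff.mp hx),
        le_of_eq (by rw [hp.count_eq])⟩
    · intro b hb
      obtain ⟨x, hx, rfl⟩ := List.mem_map.mp hb
      exact ⟨(l₁.count x : Int), List.mem_map_of_mem (hp.mem_iff.mpr hx),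
        le_of_eq (by rw [hp.count_eq])⟩

theorem one_le_maxMult (t : String) (r : List String) : 1 ≤ maxMult (t :: r) := by
  have h1 : (1 : Int) ≤ ((t :: r).count t : Int) := by
    have := List.count_pos_iff.mpr (List.mem_cons_self (a := t) (l := r))
    exact_mod_cast this
  exact le_trans h1 (le_genmax _ _ (List.mem_map_of_mem List.mem_cons_self))

theorem maxMult_cons (t : String) (r : List String) :
    maxMult (t :: r) = max ((1 : Int) + r.count t) (maxMult (r.filter (fun x => !(x == t)))) := by
  have hct : (((t :: r).count t : Nat) : Int) = 1 + r.count t := by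
    rw [List.count_cons_self]; push_cast; ring
  have hmemflt : ∀ x, x ∈ r.filter (fun y => !(y == t)) ↔ (x ∈ r ∧ x ≠ t) := by
    intro x; simp [List.mem_filter]
  have hcf : ∀ x, x ≠ t → (r.filter (fun y => !(y == t))).count x = r.count x := by
    intro x hx
    rw [List.count_filter]
    simp [hx]
  have hcx : ∀ x, x ≠ t → ((t :: r).count x) = r.count x := by
    intro x hx; simp [Ne.symm hx]
  rcases hF : r.filter (fun y => !(y == t)) with _ | ⟨f, fs⟩
  · have hall : ∀ x ∈ r, x = t := by
      intro x hx
      by_contra hne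
      have hmf : x ∈ r.filter (fun y => !(y == t)) := (hmemflt x).mpr ⟨hx, hne⟩
      rw [hF] at hmf; exact absurd hmf (List.not_mem_nil)
    obtain ⟨x, hx, hcxv⟩ := List.mem_map.mp
      (genmax_mem ((t :: r).map (fun x => ((t :: r).count x : Int))) (by simp))
    have hxt : x = t := by
      rcases List.mem_cons.mp hx with h | h
      · exact h
      · exact hall x h
    subst hxt
    unfold maxMult
    rw [← hcxv, hct]
    simp [genmax]
    omega
  · unfold maxMult
    apply le_antisymm
    · obtain ⟨x, hx, hcxv⟩ := List.mem_map.mp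
        (genmax_mem ((t :: r).map (fun x => ((t :: r).count x : Int))) (by simp))
      rw [← hcxv]
      rcases eq_or_ne x t with rfl | hne
      · exact le_max_of_le_left (le_of_eq hct)
      · have hxr : x ∈ r := (List.mem_cons.mp hx).resolve_left hne
        have hxF : x ∈ f :: fs := hF ▸ (hmemflt x).mpr ⟨hxr, hne⟩
        have hc2 : (f :: fs).count x = r.count x := by
          have := hcf x hne; rw [hF] at this; exact this
        apply le_max_of_le_right
        calc ((t :: r).count x : Int) = ((f :: fs).count x : Int) := by
              rw [hcx x hne, hc2]
          _ ≤ _ := le_genmax _ _ (List.mem_map.mpr ⟨x, hxF, rfl⟩)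
    · apply max_le
      · rw [← hct]
        exact le_genmax _ _ (List.mem_map_of_mem List.mem_cons_self)
      · obtain ⟨x, hxF, hcxv⟩ := List.mem_map.mp
          (genmax_mem ((f :: fs).map (fun x => ((f :: fs).count x : Int))) (by simp))
        rw [← hcxv]
        obtain ⟨hxr, hne⟩ := (hmemflt x).mp (hF ▸ hxF)
        have hc2 : (f :: fs).count x = r.count x := by
          have := hcf x hne; rw [hF] at this; exact this
        calc ((f :: fs).count x : Int) = ((t :: r).count x : Int) := by
              rw [hc2, hcx x hne]
          _ ≤ _ := le_genmax _ _ (List.mem_map.mpr ⟨x, List.mem_cons_of_mem t hxr, rfl⟩)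

theorem le_runM (rest : List String) (prev : String) (run : Int) : run ≤ runM rest prev run := by
  induction rest generalizing prev run with
  | nil => simp [runM]
  | cons t r ih =>
    by_cases h : t = prev
    · simp only [runM, if_pos h]
      exact le_trans (by omega) (ih prev (run + 1))
    · simp only [runM, if_neg h]; exact le_max_left _ _

theorem runM_key (rest : List String) (prev : String) (run : Int)
    (hs : (prev :: rest).Pairwise (· ≤ ·)) (hr : 1 ≤ run) :
    runM rest prev run = max (run + rest.count prev) (maxMult (rest.filter (fun x => !(x == prev)))) := by
  induction rest generalizing prev run with
  | nil => simp [runM, maxMult, genmax]; omega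
  | cons t r ih =>
    rcases List.pairwise_cons.mp hs with ⟨hple, hs'⟩
    rcases List.pairwise_cons.mp hs' with ⟨htle, hr⟩
    by_cases hteq : t = prev
    · subst hteq
      have hpair : (t :: r).Pairwise (· ≤ ·) := List.pairwise_cons.mpr ⟨fun x hx => hple x (List.mem_cons_of_mem t hx), hr⟩
      rw [runM, if_pos rfl, ih t (run + 1) hpair (by omega)]
      rw [List.count_cons_self, List.filter_cons_of_neg (by simp)]
      push_cast; omega
    · have hplt : prev < t := lt_of_le_of_ne (hple t List.mem_cons_self) (Ne.symm hteq)
      have hnotmem : prev ∉ t :: r := by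
        intro hm
        rcases List.mem_cons.mp hm with h | h
        · exact hteq h.symm
        · exact absurd rfl (ne_of_gt (lt_of_lt_of_le hplt (htle prev h)))
      have hcnt : (t :: r).count prev = 0 := List.count_eq_zero.mpr hnotmem
      have hfil : (t :: r).filter (fun x => !(x == prev)) = t :: r := by
        apply List.filter_eq_self.mpr
        intro x hx
        simp only [Bool.not_eq_eq_eq_not, Bool.not_true, beq_eq_false_iff_ne]
        intro hxp; exact hnotmem (hxp ▸ hx)
      rw [runM, if_neg hteq, ih t 1 hs' (le_refl 1), ← maxMult_cons, hcnt, hfil]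
      push_cast
      have := one_le_maxMult t r
      omega

theorem scan_eq (rest : List String) (prev : String) (run best : Int) (h : run ≤ best) :
    (rest.foldl (fun (s : String × Int × Int) t =>
        let pr := if t == s.1 then (s.1, s.2.1 + 1) else (t, (1 : Int))
        (pr.1, pr.2, if pr.2 > s.2.2 then pr.2 else s.2.2)) (prev, run, best)).2.2
      = max best (runM rest prev run) := by
  induction rest generalizing prev run best with
  | nil => simp only [List.foldl_nil, runM]; omega
  | cons t r ih =>
    by_cases hteq : t = prev
    · subst hteq
      simp only [List.foldl_cons, beq_self_eq_true, if_true, runM]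
      rw [ih t (run + 1) _ (by omega)]
      have := le_runM r t (run + 1)
      omega
    · have hbeq : (t == prev) = false := beq_eq_false_iff_ne.mpr hteq
      simp only [List.foldl_cons, hbeq, Bool.false_eq_true, if_false, runM, if_neg hteq]
      rw [ih t 1 _ (by omega)]
      have := le_runM r t 1
      omega

theorem counter_max_eq (l : List String) (h : l ≠ []) :
    PySem.List.max? (PySem.Dict.counter l).values (fun v => v) = some (maxMult l) := by
  have hvals : (PySem.Dict.counter l).values = (PySem.Set.ofList l).map (fun k => (l.count k : Int)) := by
    simp only [PySem.Dict.values, PySem.Dict.items_counter, List.map_map]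
    rfl
  obtain ⟨x, t, rfl⟩ : ∃ x t, l = x :: t := by
    cases l with
    | nil => exact absurd rfl h
    | cons x t => exact ⟨x, t, rfl⟩
  obtain ⟨k, ks, hset⟩ : ∃ k ks, PySem.Set.ofList (x :: t) = k :: ks := by
    cases hs : PySem.Set.ofList (x :: t) with
    | nil =>
      have : x ∈ PySem.Set.ofList (x :: t) := (PySem.Set.mem_ofList _ _).mpr List.mem_cons_self
      rw [hs] at this; exact absurd this (List.not_mem_nil)
    | cons k ks => exact ⟨k, ks, rfl⟩
  rw [hvals, hset, List.map_cons, PySem.List.max?_id_cons]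
  have hg : (List.map (fun k => ((x :: t).count k : Int)) ks).foldl max (((x :: t).count k : Nat) : Int)
      = genmax ((k :: ks).map (fun k => ((x :: t).count k : Int))) := rfl
  rw [hg, genmax_eq ((k :: ks).map (fun k => ((x :: t).count k : Int)))
      ((x :: t).map (fun k => ((x :: t).count k : Int))) (by simp) (by simp)
      (by
        intro a ha
        obtain ⟨y, hy, rfl⟩ := List.mem_map.mp ha
        have hyl : y ∈ x :: t := (PySem.Set.mem_ofList _ _).mp (hset ▸ hy)
        exact ⟨_, List.mem_map.mpr ⟨y, hyl, rfl⟩, le_refl _⟩)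
      (by
        intro b hb
        obtain ⟨y, hy, rfl⟩ := List.mem_map.mp hb
        have hyl : y ∈ PySem.Set.ofList (x :: t) := (PySem.Set.mem_ofList _ _).mpr hy
        exact ⟨_, List.mem_map.mpr ⟨y, hset ▸ hyl, rfl⟩, le_refl _⟩)]
  rfl

theorem sorted_scan_eq (l : List String) (p : String) (rest : List String)
    (hs : PySem.List.sorted l (fun x => x) false = p :: rest) :
    longestRun (p :: rest) = maxMult l := by
  rw [longestRun]
  have hperm : (p :: rest).Perm l := hs ▸ PySem.List.sorted_perm l (fun x => x) false
  have hpair : (p :: rest).Pairwise (· ≤ ·) := by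
    have h := PySem.List.sorted_pairwise l (fun x => x)
    rw [hs] at h
    exact h
  rw [scan_eq rest p 1 1 (le_refl 1), runM_key rest p 1 hpair (le_refl 1), ← maxMult_cons,
    max_eq_right (one_le_maxMult p rest)]
  exact maxMult_perm _ _ hperm

-- ===== VERDICT (by name: the statement is the Claim_ definition above) =====
theorem get_trigram_repetition_spec : Claim_equal_get_trigram_repetition := by
  intro text _
  unfold Spec_get_trigram_repetition
  have hA : get_trigram_repetition text =
      (if (PySem.Str.split₀ (PySem.Str.lower text)).length < 3 then 0 else
        if ((PySem.List.pyRange 0 (((PySem.Str.split₀ (PySem.Str.lower text)).length : Int) - 2) 1).map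
            (fun i => PySem.Str.join " " (PySem.List.slice (PySem.Str.split₀ (PySem.Str.lower text)) (some i) (some (i + 3))))).isEmpty = true then 0 else
          match PySem.List.max? (PySem.Dict.counter
              ((PySem.List.pyRange 0 (((PySem.Str.split₀ (PySem.Str.lower text)).length : Int) - 2) 1).map
                (fun i => PySem.Str.join " " (PySem.List.slice (PySem.Str.split₀ (PySem.Str.lower text)) (some i) (some (i + 3)))))).values (fun v => v) with
          | some m => m
          | none => 0) := rfl
  have hB : get_trigram_repetition_alt text =
      (if (PySem.Str.split₀ (PySem.Str.lower text)).length < 3 then 0 else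
        longestRun (PySem.List.sorted
            ((PySem.List.pyRange 0 (((PySem.Str.split₀ (PySem.Str.lower text)).length : Int) - 2) 1).map
              (fun i => PySem.Str.join " " (PySem.List.slice (PySem.Str.split₀ (PySem.Str.lower text)) (some i) (some (i + 3)))))
            (fun x => x) false)) := rfl
  rw [hA, hB]
  set ws := PySem.Str.split₀ (PySem.Str.lower text) with hws
  by_cases hlen : ws.length < 3
  · rw [if_pos hlen, if_pos hlen]
  · rw [if_neg hlen, if_neg hlen]
    have hrange : PySem.List.pyRange 0 ((ws.length : Int) - 2) 1
        = 0 :: PySem.List.pyRange 1 ((ws.length : Int) - 2) 1 :=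
      PySem.List.pyRange_one_cons (by omega)
    set l := (PySem.List.pyRange 0 ((ws.length : Int) - 2) 1).map
      (fun i => PySem.Str.join " " (PySem.List.slice ws (some i) (some (i + 3)))) with hl
    have hlne : l ≠ [] := by rw [hl, hrange]; simp
    have hempty : l.isEmpty = false := by
      rw [hl, hrange]; rfl
    rw [hempty, counter_max_eq l hlne]
    cases hs : PySem.List.sorted l (fun x => x) false with
    | nil =>
      have hp := PySem.List.sorted_perm l (fun x => x) false
      rw [hs] at hp
      exact absurd hp.symm.eq_nil hlne
    | cons p rest =>
      rw [sorted_scan_eq l p rest hs]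
      simp
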